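-- pv_equiv track=rewrite | github.com/HyunWoo9930/CodingTest-Study-Python | dingcorithm/3rd_week/03_07_get_receiver_top_orders.py | get_receiver_top_orders
-- ===== SOURCE A (Python) =====
-- def get_receiver_top_orders(heights):
--     stack = []  # [인덱스, 높이]를 저장
--     answer = [0] * len(heights)
--
--     for i in range(len(heights)):
--         while stack and stack[-1][1] <= heights[i]:
--             stack.pop()
--         if stack:
--             answer[i] = stack[-1][0] + 1
--         stack.append([i, heights[i]])
--
--     return answer
-- ===== SOURCE B (Python) =====
-- def get_receiver_top_orders(heights):
--     n = len(heights)
--     answer = [0] * n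
--     for i in range(n):
--         for j in range(i - 1, -1, -1):
--             if heights[j] > heights[i]:
--                 answer[i] = j + 1
--                 break
--     return answer
-- ===== Notes on version B (the rewrite author's own statement) =====
-- stated objective: simpler
-- what changed: Replaced the monotonic index/height stack with an independent backward scan per element that stops at the first strictly taller tower; no stack state is maintained.
import Mathlib
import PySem

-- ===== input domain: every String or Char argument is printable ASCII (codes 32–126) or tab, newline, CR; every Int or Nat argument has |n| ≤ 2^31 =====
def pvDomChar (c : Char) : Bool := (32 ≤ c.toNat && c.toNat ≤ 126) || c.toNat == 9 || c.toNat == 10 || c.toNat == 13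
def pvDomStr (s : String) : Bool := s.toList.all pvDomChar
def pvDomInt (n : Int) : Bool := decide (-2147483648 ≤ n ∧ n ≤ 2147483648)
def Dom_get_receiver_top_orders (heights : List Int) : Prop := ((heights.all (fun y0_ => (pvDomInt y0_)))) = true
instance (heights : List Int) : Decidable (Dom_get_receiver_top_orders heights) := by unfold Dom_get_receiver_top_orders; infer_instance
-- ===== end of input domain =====

-- B replaces A's monotonic stack with an independent backward scan per element (simpler, no shared state); same return value.

-- ===== PORT A =====
-- A's stack (Python list, top at the end) is represented head-first: Lean list head = Python stack[-1].
-- The pop-while loop 'while stack and stack[-1][1] <= heights[i]: stack.pop()' is the head-first dropWhile.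
def pvAGo (stack : List (Int × Int)) : List (Int × Int) → List Int
  | [] => []
  | (i, h) :: rest =>
    let stack' := stack.dropWhile (fun p => decide (p.2 ≤ h))
    let a : Int := match stack' with
      | [] => 0                       -- answer[i] stays 0 when the stack is empty
      | (j, _) :: _ => j + 1          -- answer[i] = stack[-1][0] + 1
    a :: pvAGo ((i, h) :: stack') rest

def get_receiver_top_orders (heights : List Int) : List Int :=
  pvAGo [] (PySem.List.enumerate heights)

-- ===== PORT B =====
-- 'for j in range(i-1, -1, -1): if heights[j] > heights[i]: answer[i]=j+1; break' —
-- scan the already-seen prefix in reverse (head = index i-1), stop at the first strictly taller.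
def pvBScan (h : Int) : List (Int × Int) → Int
  | [] => 0
  | (j, hj) :: rest => if hj > h then j + 1 else pvBScan h rest

def pvBGo (prefixRev : List (Int × Int)) : List (Int × Int) → List Int
  | [] => []
  | (i, h) :: rest => pvBScan h prefixRev :: pvBGo ((i, h) :: prefixRev) rest

def get_receiver_top_orders_alt (heights : List Int) : List Int :=
  pvBGo [] (PySem.List.enumerate heights)

-- ===== PRECONDITION & SPEC =====
def Spec_get_receiver_top_orders (heights : List Int) (out : List Int) : Prop := out = get_receiver_top_orders_alt heights
instance (heights : List Int) (out : List Int) : Decidable (Spec_get_receiver_top_orders heights out) := by unfold Spec_get_receiver_top_orders; infer_instance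

-- ===== CLAIM (what is proved, stated in full; the proofs are below) =====
def Claim_equal_get_receiver_top_orders : Prop := ∀ (heights : List Int), Dom_get_receiver_top_orders heights → Spec_get_receiver_top_orders heights (get_receiver_top_orders heights)

-- ===== LEMMAS AND PROOFS =====

-- The answer A reads off the popped stack is exactly B's scan of that stack:
-- dropping while '≤ h' and stopping at the first '> h' are the same search.
theorem pvScan_dropWhile (h : Int) (st : List (Int × Int)) :
    (match st.dropWhile (fun p => decide (p.2 ≤ h)) with
      | [] => (0 : Int)
      | (j, _) :: _ => j + 1) = pvBScan h st := by
  induction st with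
  | nil => simp [pvBScan]
  | cons p rest ih =>
    obtain ⟨j, hj⟩ := p
    by_cases hle : hj ≤ h
    · simpa [pvBScan, List.dropWhile, hle, not_lt.mpr hle] using ih
    · simp [pvBScan, List.dropWhile, hle, lt_of_not_ge hle]

-- Popping elements of height ≤ h does not change a scan for something taller than h' ≥ h.
theorem pvScan_dropWhile_le (h h' : Int) (hle : h ≤ h') (st : List (Int × Int)) :
    pvBScan h' (st.dropWhile (fun p => decide (p.2 ≤ h))) = pvBScan h' st := by
  induction st with
  | nil => rfl
  | cons p rest ih =>
    obtain ⟨j, hj⟩ := p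
    by_cases hd : hj ≤ h
    · have : ¬ hj > h' := not_lt.mpr (hd.trans hle)
      simpa [List.dropWhile, hd, pvBScan, this] using ih
    · simp [List.dropWhile, hd, pvBScan]

-- Main invariant: if the stack and the reversed prefix answer every query alike,
-- A's loop and B's loop produce the same remaining output.
theorem pvGo_eq (rest : List (Int × Int)) :
    ∀ (stack prefixRev : List (Int × Int)),
      (∀ h, pvBScan h stack = pvBScan h prefixRev) →
      pvAGo stack rest = pvBGo prefixRev rest := by
  induction rest with
  | nil => intro _ _ _; rfl
  | cons p rest ih =>
    intro stack prefixRev hrel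
    obtain ⟨i, h⟩ := p
    have hhead : (match stack.dropWhile (fun p => decide (p.2 ≤ h)) with
        | [] => (0 : Int)
        | (j, _) :: _ => j + 1) = pvBScan h prefixRev :=
      (pvScan_dropWhile h stack).trans (hrel h)
    have htail : pvAGo ((i, h) :: stack.dropWhile (fun p => decide (p.2 ≤ h))) rest
        = pvBGo ((i, h) :: prefixRev) rest := by
      apply ih
      intro h'
      by_cases hgt : h > h'
      · simp [pvBScan, hgt]
      · have hle : h ≤ h' := le_of_not_gt hgt
        simp only [pvBScan, if_neg hgt]
        exact (pvScan_dropWhile_le h h' hle stack).trans (hrel h')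
    simp only [pvAGo, pvBGo]
    exact congrArg₂ (· :: ·) hhead htail

-- ===== VERDICT (by name: the statement is the Claim_ definition above) =====
theorem get_receiver_top_orders_spec : Claim_equal_get_receiver_top_orders := by
  intro heights _
  unfold Spec_get_receiver_top_orders get_receiver_top_orders get_receiver_top_orders_alt
  exact pvGo_eq _ [] [] (fun _ => rfl)
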